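-- pv_equiv track=rewrite | github.com/urban-malaria/ChatMRPT | app/tools/strategic_decision_tools.py | _categorize_monitoring_types
-- ===== SOURCE A (Python) =====
-- from typing import Dict, Any, Optional, List
--
-- def _categorize_monitoring_types(monitoring_priorities: List[Dict]) -> Dict[str, int]:
--     """Categorize types of monitoring needed."""
--     types = {
--         'data_quality_monitoring': 0,
--         'seasonal_monitoring': 0,
--         'method_validation': 0,
--         'urbanization_tracking': 0
--     }
--
--     for ward in monitoring_priorities:
--         reasons = ward['monitoring_reasons']
--         if any('data' in reason.lower() for reason in reasons):
--             types['data_quality_monitoring'] += 1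
--         if any('flood' in reason.lower() or 'seasonal' in reason.lower() for reason in reasons):
--             types['seasonal_monitoring'] += 1
--         if any('method' in reason.lower() or 'consensus' in reason.lower() for reason in reasons):
--             types['method_validation'] += 1
--         if any('urban' in reason.lower() for reason in reasons):
--             types['urbanization_tracking'] += 1
--
--     return types
-- ===== SOURCE B (Python) =====
-- _KEYWORD_CATEGORIES = [
--     ('data', 'data_quality_monitoring'),
--     ('flood', 'seasonal_monitoring'),
--     ('seasonal', 'seasonal_monitoring'),
--     ('method', 'method_validation'),
--     ('consensus', 'method_validation'),
--     ('urban', 'urbanization_tracking'),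
-- ]
--
--
-- def _categorize_monitoring_types(monitoring_priorities):
--     """Categorize types of monitoring needed (keyword-table decomposition)."""
--     counts = {
--         'data_quality_monitoring': 0,
--         'seasonal_monitoring': 0,
--         'method_validation': 0,
--         'urbanization_tracking': 0,
--     }
--     for ward in monitoring_priorities:
--         hit = set()
--         for reason in ward['monitoring_reasons']:
--             r = reason.lower()
--             for kw, cat in _KEYWORD_CATEGORIES:
--                 if kw in r:
--                     hit.add(cat)
--         for cat in counts:
--             if cat in hit:
--                 counts[cat] += 1
--     return counts
-- ===== Notes on version B (the rewrite author's own statement) =====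
-- stated objective: alternative
-- what changed: Replaces A's four per-ward any(...) generator scans (each re-lowercasing every reason) with a single pass over each ward's reasons driven by a keyword->category table, collecting matched categories in a per-ward set and then incrementing the counters for that set.
import Mathlib
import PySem

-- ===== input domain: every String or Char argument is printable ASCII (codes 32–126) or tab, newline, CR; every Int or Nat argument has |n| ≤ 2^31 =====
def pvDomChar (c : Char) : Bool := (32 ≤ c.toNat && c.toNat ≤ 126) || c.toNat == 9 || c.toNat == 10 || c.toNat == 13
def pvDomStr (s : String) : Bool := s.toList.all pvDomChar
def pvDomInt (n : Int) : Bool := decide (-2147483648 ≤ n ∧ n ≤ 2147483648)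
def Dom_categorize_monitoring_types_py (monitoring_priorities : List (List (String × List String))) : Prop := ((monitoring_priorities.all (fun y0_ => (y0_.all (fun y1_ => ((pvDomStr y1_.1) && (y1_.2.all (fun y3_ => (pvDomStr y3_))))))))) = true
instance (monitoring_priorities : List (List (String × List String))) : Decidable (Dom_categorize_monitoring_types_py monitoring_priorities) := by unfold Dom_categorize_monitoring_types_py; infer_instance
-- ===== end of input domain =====

-- ===== PORT A =====
-- B changes decomposition only (keyword table + per-ward set); return value proved equal on Pre_ (every ward has the 'monitoring_reasons' key).
-- ward['monitoring_reasons'] raises KeyError when the key is absent; that is excluded by Pre_, the port defaults to [] there.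
def catA_step (types : PySem.Dict String Int) (ward : List (String × List String)) : PySem.Dict String Int :=
  let reasons := (PySem.Dict.mk ward).getD "monitoring_reasons" []
  let types := if reasons.any (fun reason => PySem.Str.isIn "data" (PySem.Str.lower reason)) then types.modify "data_quality_monitoring" 0 (· + 1) else types
  let types := if reasons.any (fun reason => PySem.Str.isIn "flood" (PySem.Str.lower reason) || PySem.Str.isIn "seasonal" (PySem.Str.lower reason)) then types.modify "seasonal_monitoring" 0 (· + 1) else types
  let types := if reasons.any (fun reason => PySem.Str.isIn "method" (PySem.Str.lower reason) || PySem.Str.isIn "consensus" (PySem.Str.lower reason)) then types.modify "method_validation" 0 (· + 1) else types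
  let types := if reasons.any (fun reason => PySem.Str.isIn "urban" (PySem.Str.lower reason)) then types.modify "urbanization_tracking" 0 (· + 1) else types
  types

def categorize_monitoring_types_py (monitoring_priorities : List (List (String × List String))) : List (String × Int) :=
  let types : PySem.Dict String Int := PySem.Dict.ofList [("data_quality_monitoring", 0), ("seasonal_monitoring", 0), ("method_validation", 0), ("urbanization_tracking", 0)]
  (monitoring_priorities.foldl catA_step types).items

-- ===== PORT B =====
def pvTable : List (String × String) :=
  [("data", "data_quality_monitoring"), ("flood", "seasonal_monitoring"), ("seasonal", "seasonal_monitoring"),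
   ("method", "method_validation"), ("consensus", "method_validation"), ("urban", "urbanization_tracking")]

def catB_step (counts : PySem.Dict String Int) (ward : List (String × List String)) : PySem.Dict String Int :=
  let hit : PySem.Set String := ((PySem.Dict.mk ward).getD "monitoring_reasons" []).foldl
    (fun hit reason =>
      let r := PySem.Str.lower reason
      pvTable.foldl (fun hit p => if PySem.Str.isIn p.1 r then PySem.Set.add hit p.2 else hit) hit)
    PySem.Set.empty
  counts.keys.foldl (fun counts cat => if hit.contains cat then counts.modify cat 0 (· + 1) else counts) counts

def categorize_monitoring_types_py_alt (monitoring_priorities : List (List (String × List String))) : List (String × Int) :=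
  let counts : PySem.Dict String Int := PySem.Dict.ofList [("data_quality_monitoring", 0), ("seasonal_monitoring", 0), ("method_validation", 0), ("urbanization_tracking", 0)]
  (monitoring_priorities.foldl catB_step counts).items

-- ===== PRECONDITION & SPEC =====
-- Pre_ excludes exactly the wards without a 'monitoring_reasons' key, on which Python A (and B) raise KeyError.
def Pre_categorize_monitoring_types_py (monitoring_priorities : List (List (String × List String))) : Prop :=
  ∀ ward ∈ monitoring_priorities, "monitoring_reasons" ∈ ward.map Prod.fst
instance (monitoring_priorities : List (List (String × List String))) : Decidable (Pre_categorize_monitoring_types_py monitoring_priorities) := by unfold Pre_categorize_monitoring_types_py; infer_instance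

def pvWitness_categorize_monitoring_types_py : (List (List (String × List String))) :=
  [[("monitoring_reasons", ["Flood risk", "urban growth"])], [("monitoring_reasons", [])]]

def Spec_categorize_monitoring_types_py (monitoring_priorities : List (List (String × List String))) (out : List (String × Int)) : Prop := out = categorize_monitoring_types_py_alt monitoring_priorities
instance (monitoring_priorities : List (List (String × List String))) (out : List (String × Int)) : Decidable (Spec_categorize_monitoring_types_py monitoring_priorities out) := by unfold Spec_categorize_monitoring_types_py; infer_instance

-- ===== CLAIM (what is proved, stated in full; the proofs are below) =====
def Claim_equal_categorize_monitoring_types_py : Prop := ∀ (monitoring_priorities : List (List (String × List String))), Dom_categorize_monitoring_types_py monitoring_priorities → Pre_categorize_monitoring_types_py monitoring_priorities → Spec_categorize_monitoring_types_py monitoring_priorities (categorize_monitoring_types_py monitoring_priorities)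

-- ===== LEMMAS AND PROOFS =====
lemma inner_dq (s : PySem.Set String) (r : String) :
    (pvTable.foldl (fun hit p => if PySem.Str.isIn p.1 r then PySem.Set.add hit p.2 else hit) s).contains "data_quality_monitoring"
      = (s.contains "data_quality_monitoring" || PySem.Str.isIn "data" r) := by
  simp only [pvTable, List.foldl_cons, List.foldl_nil]
  split_ifs <;> simp_all

lemma inner_seas (s : PySem.Set String) (r : String) :
    (pvTable.foldl (fun hit p => if PySem.Str.isIn p.1 r then PySem.Set.add hit p.2 else hit) s).contains "seasonal_monitoring"
      = (s.contains "seasonal_monitoring" || (PySem.Str.isIn "flood" r || PySem.Str.isIn "seasonal" r)) := by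
  simp only [pvTable, List.foldl_cons, List.foldl_nil]
  split_ifs <;> simp_all

lemma inner_meth (s : PySem.Set String) (r : String) :
    (pvTable.foldl (fun hit p => if PySem.Str.isIn p.1 r then PySem.Set.add hit p.2 else hit) s).contains "method_validation"
      = (s.contains "method_validation" || (PySem.Str.isIn "method" r || PySem.Str.isIn "consensus" r)) := by
  simp only [pvTable, List.foldl_cons, List.foldl_nil]
  split_ifs <;> simp_all

lemma inner_urb (s : PySem.Set String) (r : String) :
    (pvTable.foldl (fun hit p => if PySem.Str.isIn p.1 r then PySem.Set.add hit p.2 else hit) s).contains "urbanization_tracking"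
      = (s.contains "urbanization_tracking" || PySem.Str.isIn "urban" r) := by
  simp only [pvTable, List.foldl_cons, List.foldl_nil]
  split_ifs <;> simp_all

-- the per-ward hit set contains a category iff some reason matches one of its keywords
lemma hit_fold (x : String) (flag : String → Bool)
    (hinner : ∀ (s : PySem.Set String) (r : String),
      (pvTable.foldl (fun hit p => if PySem.Str.isIn p.1 r then PySem.Set.add hit p.2 else hit) s).contains x
        = (s.contains x || flag r)) :
    ∀ (reasons : List String) (s : PySem.Set String),
      (reasons.foldl (fun hit reason =>
          let r := PySem.Str.lower reason
          pvTable.foldl (fun hit p => if PySem.Str.isIn p.1 r then PySem.Set.add hit p.2 else hit) hit) s).contains x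
        = (s.contains x || reasons.any (fun reason => flag (PySem.Str.lower reason)))
  | [], s => by simp
  | r :: rs, s => by
    rw [List.foldl_cons, hit_fold x flag hinner rs]
    simp only []
    rw [hinner, List.any_cons]
    simp [Bool.or_assoc]

-- on a dict with exactly the four category keys, one A-ward-step equals one B-ward-step
lemma step_eq (d : PySem.Dict String Int) (w : List (String × List String))
    (hk : d.keys = ["data_quality_monitoring", "seasonal_monitoring", "method_validation", "urbanization_tracking"]) :
    catA_step d w = catB_step d w := by
  unfold catA_step catB_step
  rw [hk]
  simp only [List.foldl_cons, List.foldl_nil,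
    hit_fold _ (fun r => PySem.Str.isIn "data" r) inner_dq,
    hit_fold _ (fun r => PySem.Str.isIn "flood" r || PySem.Str.isIn "seasonal" r) inner_seas,
    hit_fold _ (fun r => PySem.Str.isIn "method" r || PySem.Str.isIn "consensus" r) inner_meth,
    hit_fold _ (fun r => PySem.Str.isIn "urban" r) inner_urb]
  simp [PySem.Set.empty]

lemma keys_insert_mem (d : PySem.Dict String Int) (k : String) (v : Int)
    (h : k ∈ d.keys) : (d.insert k v).keys = d.keys :=
  PySem.Dict.keys_insert_of_contains _ _ ((PySem.Dict.contains_iff_mem_keys d k).mpr h)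

lemma keys_if_modify (d : PySem.Dict String Int) (k : String) (f : Int → Int)
    (c : Prop) [Decidable c] (K : List String) (hk : d.keys = K) (hm : k ∈ K) :
    (if c then d.modify k 0 f else d).keys = K := by
  split_ifs
  · rw [PySem.Dict.keys_modify, keys_insert_mem d k _ (hk ▸ hm), hk]
  · exact hk

lemma keys_catA_step (d : PySem.Dict String Int) (w : List (String × List String))
    (hk : d.keys = ["data_quality_monitoring", "seasonal_monitoring", "method_validation", "urbanization_tracking"]) :
    (catA_step d w).keys = d.keys := by
  unfold catA_step
  dsimp only
  rw [hk]
  exact keys_if_modify _ _ _ _ _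
    (keys_if_modify _ _ _ _ _
      (keys_if_modify _ _ _ _ _
        (keys_if_modify _ _ _ _ _ hk (by simp)) (by simp)) (by simp)) (by simp)

lemma fold_eq : ∀ (mp : List (List (String × List String))) (d : PySem.Dict String Int),
    d.keys = ["data_quality_monitoring", "seasonal_monitoring", "method_validation", "urbanization_tracking"] →
    mp.foldl catA_step d = mp.foldl catB_step d
  | [], _, _ => rfl
  | w :: ws, d, hk => by
    rw [List.foldl_cons, List.foldl_cons, ← step_eq d w hk]
    exact fold_eq ws _ (by rw [keys_catA_step d w hk, hk])

-- ===== VERDICT (by name: the statement is the Claim_ definition above) =====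
theorem categorize_monitoring_types_py_spec : Claim_equal_categorize_monitoring_types_py := by
  intro mp _hdom _hpre
  unfold Spec_categorize_monitoring_types_py categorize_monitoring_types_py categorize_monitoring_types_py_alt
  dsimp only
  rw [fold_eq mp _ (by decide)]
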